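-- pv_equiv track=rewrite | github.com/cmmill28/TEPPL-AI-V1 | src/app_multimodal.py | _clean_and_format_content
-- ===== SOURCE A (Python) =====
-- def _clean_and_format_content(content):
--     """Clean and format content for professional display"""
--     # Remove excessive whitespace
--     content = ' '.join(content.split())
--
--     # Format common technical terms
--     replacements = {
--         'MUTCD': '**MUTCD**',
--         'NCDOT': '**NCDOT**',
--         'CFR': '**CFR**',
--         'shall': '**shall**',
--         'must': '**must**',
--         'required': '**required**'
--     }
--
--     for old, new in replacements.items():
--         content = content.replace(old, new)
--
--     return content
-- ===== SOURCE B (Python) =====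
-- def _clean_and_format_content(content):
--     """Clean and format content for professional display"""
--     # Remove excessive whitespace
--     content = ' '.join(content.split())
--
--     # Single left-to-right scan: at each position wrap the first matching
--     # keyword in ** and skip past it, instead of six full replace passes.
--     keywords = ('MUTCD', 'NCDOT', 'CFR', 'shall', 'must', 'required')
--     out = []
--     i = 0
--     n = len(content)
--     while i < n:
--         for kw in keywords:
--             if content.startswith(kw, i):
--                 out.append('**' + kw + '**')
--                 i += len(kw)
--                 break
--         else:
--             out.append(content[i])
--             i += 1
--     return ''.join(out)
-- ===== Notes on version B (the rewrite author's own statement) =====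
-- stated objective: alternative
-- what changed: Replaces the six sequential str.replace passes with a single left-to-right scan that wraps the first keyword matching at each position and skips past it (equivalent because no keyword overlaps or contains another keyword or a '*').
import Mathlib
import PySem

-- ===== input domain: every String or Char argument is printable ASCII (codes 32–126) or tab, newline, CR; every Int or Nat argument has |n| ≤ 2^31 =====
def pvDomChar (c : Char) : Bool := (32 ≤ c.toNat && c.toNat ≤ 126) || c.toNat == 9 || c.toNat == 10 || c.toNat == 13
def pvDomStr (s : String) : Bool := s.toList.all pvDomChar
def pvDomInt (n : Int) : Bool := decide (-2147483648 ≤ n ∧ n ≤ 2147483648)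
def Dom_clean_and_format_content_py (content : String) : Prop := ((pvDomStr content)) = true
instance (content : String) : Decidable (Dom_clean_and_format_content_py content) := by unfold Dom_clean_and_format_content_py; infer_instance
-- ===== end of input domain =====

-- B replaces the six sequential str.replace passes by one left-to-right scan that wraps
-- the first matching keyword at each position (objective: alternative single-pass algorithm).

-- ===== PORT A =====
def clean_and_format_content_py (content : String) : String :=
  -- content = ' '.join(content.split())
  let content := PySem.Str.join " " (PySem.Str.split₀ content)
  -- the six content.replace(old, new) calls, in dict order
  let content := PySem.Str.replace content "MUTCD" "**MUTCD**"
  let content := PySem.Str.replace content "NCDOT" "**NCDOT**"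
  let content := PySem.Str.replace content "CFR" "**CFR**"
  let content := PySem.Str.replace content "shall" "**shall**"
  let content := PySem.Str.replace content "must" "**must**"
  let content := PySem.Str.replace content "required" "**required**"
  content

-- ===== PORT B =====
-- the keywords tuple of B, in order
def pvKeywords : List (List Char) :=
  ["MUTCD".toList, "NCDOT".toList, "CFR".toList, "shall".toList, "must".toList, "required".toList]

-- B's while-loop: at each position emit '**'+kw+'**' for the first keyword that
-- starts there (skipping past it), else copy the character.
def pvScan (kws : List (List Char)) : List Char → List Char
  | [] => []
  | c :: t =>
    match kws.find? (fun kw => kw.isPrefixOf (c :: t)) with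
    | some kw => '*' :: '*' :: (kw ++ '*' :: '*' :: pvScan kws (t.drop (kw.length - 1)))
    | none => c :: pvScan kws t
termination_by s => s.length
decreasing_by
  · simp only [List.length_cons, List.length_drop]; omega
  · simp only [List.length_cons]; omega

def clean_and_format_content_py_alt (content : String) : String :=
  let ns := PySem.Str.join " " (PySem.Str.split₀ content)
  String.ofList (pvScan pvKeywords ns.toList)

-- ===== PRECONDITION & SPEC =====
def Spec_clean_and_format_content_py (content : String) (out : String) : Prop := out = clean_and_format_content_py_alt content
instance (content : String) (out : String) : Decidable (Spec_clean_and_format_content_py content out) := by unfold Spec_clean_and_format_content_py; infer_instance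

-- ===== CLAIM (what is proved, stated in full; the proofs are below) =====
def Claim_equal_clean_and_format_content_py : Prop := ∀ (content : String), Dom_clean_and_format_content_py content → Spec_clean_and_format_content_py content (clean_and_format_content_py content)

-- ===== LEMMAS AND PROOFS =====

-- clean recursion equivalent to PySem.Chars.replace (for old ≠ [])
def pvRepC (old new : List Char) : List Char → List Char
  | [] => []
  | c :: t =>
    if old.isPrefixOf (c :: t) then new ++ pvRepC old new (t.drop (old.length - 1))
    else c :: pvRepC old new t
termination_by s => s.length
decreasing_by
  · simp only [List.length_cons, List.length_drop]; omega
  · simp only [List.length_cons]; omega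

def pvWrap (k : List Char) : List Char := '*' :: '*' :: (k ++ ['*', '*'])

def pvChain : List (List Char) → List Char → List Char
  | [], s => s
  | k :: ks, s => pvChain ks (pvRepC k (pvWrap k) s)

def pvGood (kws : List (List Char)) : Prop :=
  kws.Nodup ∧
  (∀ m ∈ kws, m ≠ [] ∧ '*' ∉ m) ∧
  (∀ m1 ∈ kws, ∀ m2 ∈ kws, m1 ≠ m2 → ¬ (m1 <:+: m2)) ∧
  (∀ m1 ∈ kws, ∀ m2 ∈ kws, ∀ p, p < m1.length → 0 < p → ¬ ((m1.drop p) <+: m2))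

lemma pvGood_kws : pvGood pvKeywords := by
  unfold pvGood pvKeywords
  refine ⟨by decide, by decide, by decide, by decide⟩

lemma pvGood_tail {k : List Char} {K : List (List Char)} (h : pvGood (k :: K)) : pvGood K := by
  obtain ⟨h0, h1, h2, h3⟩ := h
  exact ⟨(List.nodup_cons.mp h0).2,
         fun m hm => h1 m (List.mem_cons_of_mem _ hm),
         fun m1 hm1 m2 hm2 => h2 m1 (List.mem_cons_of_mem _ hm1) m2 (List.mem_cons_of_mem _ hm2),
         fun m1 hm1 m2 hm2 => h3 m1 (List.mem_cons_of_mem _ hm1) m2 (List.mem_cons_of_mem _ hm2)⟩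

lemma pv_go_eq (old new : List Char) (hold : old ≠ []) :
    ∀ fuel l acc, l.length ≤ fuel →
      PySem.Chars.replace.go old new fuel l acc = acc.reverse ++ pvRepC old new l := by
  intro fuel
  induction fuel with
  | zero =>
    intro l acc hl
    have : l = [] := List.length_eq_zero_iff.mp (Nat.le_zero.mp hl)
    subst this
    rw [PySem.Chars.replace.go, pvRepC]
  | succ fuel ih =>
    intro l acc hl
    cases l with
    | nil =>
      rw [PySem.Chars.replace.go, pvRepC] <;> simp
    | cons c t =>
      rw [PySem.Chars.replace.go, pvRepC]
      by_cases hpre : old.isPrefixOf (c :: t)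
      · rw [if_pos hpre, if_pos hpre]
        have hlen : 1 ≤ old.length := by
          cases old with
          | nil => exact absurd rfl hold
          | cons _ _ => simp
        have hdrop : List.drop old.length (c :: t) = List.drop (old.length - 1) t := by
          cases old with
          | nil => exact absurd rfl hold
          | cons _ _ => simp
        rw [hdrop, ih _ _ (by simp at hl ⊢; omega)]
        simp
      · rw [if_neg hpre, if_neg hpre, ih _ _ (by simp at hl ⊢; omega)]
        simp

lemma pv_replace_eq (old new s : List Char) (hold : old ≠ []) :
    PySem.Chars.replace s old new = pvRepC old new s := by
  rw [PySem.Chars.replace]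
  rw [if_neg (by simpa using hold)]
  simpa using pv_go_eq old new hold s.length s [] le_rfl

-- a prefix avoiding '*' of a ++ '*' :: b is a prefix of a
lemma pv_prefix_append_star (m a b : List Char) (hs : '*' ∉ m) (h : m <+: a ++ '*' :: b) :
    m <+: a := by
  induction a generalizing m with
  | nil =>
    cases m with
    | nil => exact List.nil_prefix
    | cons y m' =>
      obtain ⟨rfl, -⟩ := List.cons_prefix_cons.mp h
      exact absurd (List.mem_cons_self) hs
  | cons x a' ih =>
    cases m with
    | nil => exact List.nil_prefix
    | cons y m' =>
      obtain ⟨rfl, h'⟩ := List.cons_prefix_cons.mp h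
      exact List.cons_prefix_cons.mpr ⟨rfl, ih m' (fun hmem => hs (List.mem_cons_of_mem _ hmem)) h'⟩

-- prefixes of a common list are comparable; shorter prefix of longer
-- a '*'-free prefix of the replaced string is a prefix of the original
lemma pv_prefix_rep (k : List Char) :
    ∀ t m, '*' ∉ m → m <+: pvRepC k (pvWrap k) t → m <+: t := by
  suffices H : ∀ n t m, t.length ≤ n → '*' ∉ m → m <+: pvRepC k (pvWrap k) t → m <+: t by
    exact fun t m hs hp => H t.length t m le_rfl hs hp
  intro n
  induction n with
  | zero =>
    intro t m ht hs hp
    have : t = [] := List.length_eq_zero_iff.mp (Nat.le_zero.mp ht)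
    subst this
    rw [pvRepC] at hp
    exact hp
  | succ n ih =>
    intro t m ht hs hp
    cases t with
    | nil => rw [pvRepC] at hp; exact hp
    | cons c t' =>
      rw [pvRepC] at hp
      by_cases hpre : k.isPrefixOf (c :: t')
      · rw [if_pos hpre] at hp
        cases m with
        | nil => exact List.nil_prefix
        | cons y m' =>
          simp only [pvWrap, List.cons_append] at hp
          obtain ⟨rfl, -⟩ := List.cons_prefix_cons.mp hp
          exact absurd (List.mem_cons_self) hs
      · rw [if_neg hpre] at hp
        cases m with
        | nil => exact List.nil_prefix
        | cons y m' =>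
          obtain ⟨rfl, hp'⟩ := List.cons_prefix_cons.mp hp
          exact List.cons_prefix_cons.mpr
            ⟨rfl, ih t' m' (by simpa using ht) (fun hmem => hs (List.mem_cons_of_mem _ hmem)) hp'⟩

lemma pv_rep_skip (k w m rest : List Char)
    (h : ∀ p, p < m.length → ¬ k.isPrefixOf (m.drop p ++ rest)) :
    pvRepC k w (m ++ rest) = m ++ pvRepC k w rest := by
  induction m with
  | nil => rfl
  | cons c m' ih =>
    cases rest' : m' ++ rest with
    | nil =>
      have h0 := h 0 (by simp)
      rw [List.cons_append, pvRepC, rest']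
      simp only [List.drop_nil]
      rw [if_neg (by simpa [rest'] using h0), ← rest', ih (fun p hp => by
        have := h (p + 1) (by simp; omega); simpa using this)]
      simp
    | cons d u =>
      have h0 := h 0 (by simp)
      rw [List.cons_append, pvRepC, rest']
      rw [if_neg (by simpa [rest'] using h0), ← rest', ih (fun p hp => by
        have := h (p + 1) (by simp; omega); simpa using this)]
      simp

lemma pv_scan_skip (K : List (List Char)) (w u : List Char)
    (h : ∀ p, p < w.length → (List.find? (fun kw => kw.isPrefixOf (w.drop p ++ u)) K) = none) :
    pvScan K (w ++ u) = w ++ pvScan K u := by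
  induction w with
  | nil => rfl
  | cons c w' ih =>
    have h0 := h 0 (by simp)
    simp only [List.drop_zero, List.cons_append] at h0
    rw [List.cons_append, pvScan, h0, ih (fun p hp => by
      have := h (p + 1) (by simp; omega); simpa using this)]
    simp

lemma pv_find?_eq_some_of_unique {α : Type} (p : α → Bool) (K : List α) (m : α)
    (hm : m ∈ K) (hp : p m = true) (huniq : ∀ m' ∈ K, p m' = true → m' = m) :
    K.find? p = some m := by
  induction K with
  | nil => cases hm
  | cons a K ih =>
    by_cases ha : p a = true
    · rw [List.find?_cons_of_pos ha, huniq a (List.mem_cons_self) ha]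
    · rw [List.find?_cons_of_neg (by simpa using ha)]
      rcases List.mem_cons.mp hm with rfl | hm'
      · exact absurd hp ha
      · exact ih hm' (fun m' hm'' => huniq m' (List.mem_cons_of_mem _ hm''))

lemma pv_scan_nil (s : List Char) : pvScan [] s = s := by
  induction s with
  | nil => rw [pvScan]
  | cons c t ih => rw [pvScan]; simp only [List.find?_nil]; rw [ih]

lemma pv_scan_nil' (kws : List (List Char)) : pvScan kws [] = [] := by
  rw [pvScan]

lemma pv_not_prefix_star (m X : List Char) (hne : m ≠ []) (hstar : '*' ∉ m) :
    ¬ m <+: '*' :: X := by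
  intro h
  cases m with
  | nil => exact hne rfl
  | cons y m' =>
    obtain ⟨rfl, -⟩ := List.cons_prefix_cons.mp h
    exact hstar (List.mem_cons_self)

lemma pv_repC_match (k w s : List Char) (hk : k ≠ []) (hpre : k <+: s) :
    pvRepC k w s = w ++ pvRepC k w (s.drop k.length) := by
  obtain ⟨t, rfl⟩ := hpre
  cases k with
  | nil => exact absurd rfl hk
  | cons kc kt =>
    rw [List.cons_append, pvRepC,
        if_pos (List.isPrefixOf_iff_prefix.mpr (by exact List.prefix_append _ _))]
    simp

lemma pv_scan_match (K : List (List Char)) (m v : List Char) (hne : m ≠ [])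
    (hfind : List.find? (fun kw => kw.isPrefixOf (m ++ v)) K = some m) :
    pvScan K (m ++ v) = '*' :: '*' :: (m ++ '*' :: '*' :: pvScan K v) := by
  cases m with
  | nil => exact absurd rfl hne
  | cons c m0 =>
    rw [List.cons_append, pvScan]
    simp only [List.cons_append] at hfind
    rw [hfind]
    have h2 : (m0 ++ v).drop ((c :: m0).length - 1) = v := by
      simp
    simp only [h2, List.cons_append]

-- the key lemma: scanning with the remaining keywords after one replace pass
-- equals scanning with the full keyword list
lemma pv_key (k : List Char) (K : List (List Char)) (hg : pvGood (k :: K)) :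
    ∀ n s, s.length ≤ n → pvScan K (pvRepC k (pvWrap k) s) = pvScan (k :: K) s := by
  obtain ⟨h0, h1, h2, h3⟩ := hg
  obtain ⟨hkne, hkstar⟩ := h1 k (List.mem_cons_self)
  have hknotK : k ∉ K := (List.nodup_cons.mp h0).1
  intro n
  induction n with
  | zero =>
    intro s hs
    have : s = [] := List.length_eq_zero_iff.mp (Nat.le_zero.mp hs)
    subst this
    rw [pvRepC, pv_scan_nil', pv_scan_nil']
  | succ n ih =>
    intro s hs
    by_cases hpre : k <+: s
    · -- a keyword-k match at the head: one replacement emitted on both sides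
      obtain ⟨s', rfl⟩ := hpre
      rw [pv_repC_match k (pvWrap k) _ hkne (List.prefix_append _ _), List.drop_left]
      have hscan : pvScan K (pvWrap k ++ pvRepC k (pvWrap k) s')
          = pvWrap k ++ pvScan K (pvRepC k (pvWrap k) s') := by
        apply pv_scan_skip
        intro p hp
        apply List.find?_eq_none.mpr
        intro m hmK hmp
        obtain ⟨hmne, hmstar⟩ := h1 m (List.mem_cons_of_mem _ hmK)
        have hmk : m ≠ k := fun e => hknotK (e ▸ hmK)
        have hmp' := List.isPrefixOf_iff_prefix.mp hmp
        simp only [pvWrap, List.length_cons, List.length_append, List.length_nil] at hp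
        exfalso
        rcases p with _ | _ | p2
        · simp only [List.drop_zero, pvWrap, List.cons_append] at hmp'
          exact pv_not_prefix_star _ _ hmne hmstar hmp'
        · simp only [pvWrap, List.drop_succ_cons, List.drop_zero, List.cons_append] at hmp'
          exact pv_not_prefix_star _ _ hmne hmstar hmp'
        · by_cases hlt : p2 ≤ k.length
          ·
            have hdrop : (pvWrap k).drop (p2+2) = k.drop p2 ++ ['*', '*'] := by
              simp only [pvWrap, List.drop_succ_cons]
              exact List.drop_append_of_le_length hlt
            rw [hdrop] at hmp'
            have hmp2 : m <+: k.drop p2 := by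
              apply pv_prefix_append_star m _ ('*' :: pvRepC k (pvWrap k) s') hmstar
              simpa using hmp'
            rcases Nat.eq_zero_or_pos p2 with rfl | hp2pos
            · simp only [List.drop_zero] at hmp2
              exact h2 m (List.mem_cons_of_mem _ hmK) k (List.mem_cons_self) hmk hmp2.isInfix
            · by_cases hplen : p2 < k.length
              · exact h2 m (List.mem_cons_of_mem _ hmK) k (List.mem_cons_self) hmk
                  (List.IsInfix.trans hmp2.isInfix (List.drop_suffix p2 k).isInfix)
              · have : k.drop p2 = [] := by
                  apply List.drop_eq_nil_of_le; omega
                rw [this] at hmp2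
                exact hmne (List.prefix_nil.mp hmp2)
          ·
            have hdrop : (pvWrap k).drop (p2+2) = ['*','*'].drop (p2 - k.length) := by
              simp only [pvWrap, List.drop_succ_cons]
              rw [List.drop_append, List.drop_eq_nil_of_le (by omega), List.nil_append]
            rw [hdrop] at hmp'
            have hd : p2 - k.length = 0 ∨ p2 - k.length = 1 := by omega
            rcases hd with hd | hd <;> rw [hd] at hmp' <;>
              simp only [List.drop_zero, List.drop_succ_cons, List.cons_append] at hmp' <;>
              exact pv_not_prefix_star _ _ hmne hmstar hmp'
      rw [hscan, ih s' (by
        simp only [List.length_append] at hs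
        have := List.length_pos_of_ne_nil hkne
        omega)]
      rw [pv_scan_match (k :: K) k s' hkne
          (List.find?_cons_of_pos (List.isPrefixOf_iff_prefix.mpr (List.prefix_append _ _)))]
      simp [pvWrap]
    · cases hFK : List.find? (fun kw => kw.isPrefixOf s) K with
      | none =>
        -- no keyword matches at the head: both sides copy one character
        cases s with
        | nil => rw [pvRepC, pv_scan_nil', pv_scan_nil']
        | cons c t =>
          rw [pvRepC, if_neg (fun h => hpre (List.isPrefixOf_iff_prefix.mp h))]
          have hnone : List.find? (fun kw => kw.isPrefixOf (c :: pvRepC k (pvWrap k) t)) K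
              = none := by
            apply List.find?_eq_none.mpr
            intro m hmK hmp
            obtain ⟨hmne, hmstar⟩ := h1 m (List.mem_cons_of_mem _ hmK)
            have hmp' := List.isPrefixOf_iff_prefix.mp hmp
            cases m with
            | nil => exact hmne rfl
            | cons y m0 =>
              obtain ⟨rfl, hm0⟩ := List.cons_prefix_cons.mp hmp'
              have : m0 <+: t := pv_prefix_rep k t m0
                (fun hmem => hmstar (List.mem_cons_of_mem _ hmem)) hm0
              exact (List.find?_eq_none.mp hFK _ hmK)
                (List.isPrefixOf_iff_prefix.mpr (List.cons_prefix_cons.mpr ⟨rfl, this⟩))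
          rw [pvScan, hnone, ih t (by simp at hs; omega)]
          have hnone2 : List.find? (fun kw => kw.isPrefixOf (c :: t)) (k :: K) = none := by
            rw [List.find?_cons_of_neg
              (by simpa using fun h => hpre (List.isPrefixOf_iff_prefix.mp h))]
            exact hFK
          rw [pvScan, hnone2]
      | some m =>
        -- a later keyword matches first at the head
        have hmem := List.mem_of_find?_eq_some hFK
        have hmp : m <+: s := List.isPrefixOf_iff_prefix.mp (by simpa using List.find?_some hFK)
        obtain ⟨hmne, hmstar⟩ := h1 m (List.mem_cons_of_mem _ hmem)
        have hmk : m ≠ k := fun e => hknotK (e ▸ hmem)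
        obtain ⟨rest, rfl⟩ := hmp
        have hrep : pvRepC k (pvWrap k) (m ++ rest) = m ++ pvRepC k (pvWrap k) rest := by
          apply pv_rep_skip
          intro p hp hkp
          have hkp' := List.isPrefixOf_iff_prefix.mp hkp
          rcases Nat.eq_zero_or_pos p with rfl | hppos
          · simp only [List.drop_zero] at hkp'
            exact hpre hkp'
          · rcases List.prefix_or_prefix_of_prefix hkp' (List.prefix_append _ _) with hc | hc
            · exact h2 k (List.mem_cons_self) m (List.mem_cons_of_mem _ hmem) (Ne.symm hmk)
                (List.IsInfix.trans hc.isInfix (List.drop_suffix p m).isInfix) 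
            · exact h3 m (List.mem_cons_of_mem _ hmem) k (List.mem_cons_self) p hp hppos hc
        rw [hrep]
        have huniq : ∀ v, ∀ m' ∈ K, (m'.isPrefixOf (m ++ v)) = true → m' = m := by
          intro v m' hm' hpm'
          have hpm'' := List.isPrefixOf_iff_prefix.mp hpm'
          by_contra hne'
          rcases List.prefix_or_prefix_of_prefix hpm'' (List.prefix_append m v) with hc | hc
          · exact h2 m' (List.mem_cons_of_mem _ hm') m (List.mem_cons_of_mem _ hmem) hne' hc.isInfix
          · exact h2 m (List.mem_cons_of_mem _ hmem) m' (List.mem_cons_of_mem _ hm')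
              (Ne.symm hne') hc.isInfix
        have hfind1 : List.find? (fun kw => kw.isPrefixOf (m ++ pvRepC k (pvWrap k) rest)) K
            = some m :=
          pv_find?_eq_some_of_unique _ _ _ hmem
            (List.isPrefixOf_iff_prefix.mpr (List.prefix_append _ _)) (huniq _)
        rw [pv_scan_match K m _ hmne hfind1,
            ih rest (by simp only [List.length_append] at hs
                        have := List.length_pos_of_ne_nil hmne; omega)]
        have hfind2 : List.find? (fun kw => kw.isPrefixOf (m ++ rest)) (k :: K) = some m := by
          rw [List.find?_cons_of_neg
            (by simpa using fun h => hpre (List.isPrefixOf_iff_prefix.mp h))]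
          exact hFK
        rw [pv_scan_match (k :: K) m rest hmne hfind2]

lemma pv_chain_eq_scan (kws : List (List Char)) (hg : pvGood kws) (s : List Char) :
    pvChain kws s = pvScan kws s := by
  induction kws generalizing s with
  | nil => simp [pvChain, pv_scan_nil]
  | cons k K ih =>
    show pvChain K (pvRepC k (pvWrap k) s) = _
    rw [ih (pvGood_tail hg), pv_key k K hg s.length _ le_rfl]

-- ===== VERDICT (by name: the statement is the Claim_ definition above) =====
theorem clean_and_format_content_py_spec : Claim_equal_clean_and_format_content_py := by
  intro content _
  unfold Spec_clean_and_format_content_py clean_and_format_content_py clean_and_format_content_py_alt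
  apply String.toList_inj.mp
  have key := pv_chain_eq_scan pvKeywords pvGood_kws
      ((PySem.Str.join " " (PySem.Str.split₀ content)).toList)
  simp only [pvChain, pvKeywords] at key
  simp only [PySem.Str.toList_replace]
  rw [pv_replace_eq "MUTCD".toList "**MUTCD**".toList _ (by decide),
      pv_replace_eq "NCDOT".toList "**NCDOT**".toList _ (by decide),
      pv_replace_eq "CFR".toList "**CFR**".toList _ (by decide),
      pv_replace_eq "shall".toList "**shall**".toList _ (by decide),
      pv_replace_eq "must".toList "**must**".toList _ (by decide),
      pv_replace_eq "required".toList "**required**".toList _ (by decide),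
      show ("**MUTCD**".toList) = pvWrap "MUTCD".toList from by decide,
      show ("**NCDOT**".toList) = pvWrap "NCDOT".toList from by decide,
      show ("**CFR**".toList) = pvWrap "CFR".toList from by decide,
      show ("**shall**".toList) = pvWrap "shall".toList from by decide,
      show ("**must**".toList) = pvWrap "must".toList from by decide,
      show ("**required**".toList) = pvWrap "required".toList from by decide]
  rw [key]
  simp [pvKeywords, String.toList_ofList]
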